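-- pv_equiv track=rewrite | github.com/jgorset/django-respite | respite/utils/parsers.py | parse_http_accept_header
-- ===== SOURCE A (Python) =====
-- def parse_http_accept_header(header):
--     """
--     Return a list of content types listed in the HTTP Accept header
--     ordered by quality.
--
--     :param header: A string describing the contents of the HTTP Accept header.
--     """
--     components = [item.strip() for item in header.split(',')]
--
--     l = []
--     for component in components:
--         if ';' in component:
--             subcomponents = [item.strip() for item in component.split(';')]
--             l.append(
--                 (
--                     subcomponents[0], # eg. 'text/html'
--                     subcomponents[1][2:] # eg. 'q=0.9'
--                 )
--             )
--         else:
--             l.append((component, '1'))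
--
--     l.sort(
--         key = lambda i: i[1],
--         reverse = True
--     )
--
--     content_types = []
--     for i in l:
--         content_types.append(i[0])
--
--     return content_types
-- ===== SOURCE B (Python) =====
-- def _parse_component(item):
--     """Return (content type, quality string) for one comma-separated item."""
--     component = item.strip()
--     if ';' in component:
--         subcomponents = [s.strip() for s in component.split(';')]
--         return subcomponents[0], subcomponents[1][2:]
--     return component, '1'
--
--
-- def parse_http_accept_header(header):
--     """
--     Return a list of content types listed in the HTTP Accept header
--     ordered by quality.
--
--     :param header: A string describing the contents of the HTTP Accept header.
--     """
--     # Online insertion: keep two parallel lists ordered by ASCENDING quality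
--     # string (ties: later-parsed entries first), insert each entry at its
--     # position as it is parsed, and reverse once at the end.  No final sort.
--     types = []
--     quals = []
--     for item in header.split(','):
--         content_type, quality = _parse_component(item)
--         i = 0
--         while i < len(quals) and quals[i] < quality:
--             i += 1
--         types.insert(i, content_type)
--         quals.insert(i, quality)
--     types.reverse()
--     return types
-- ===== Notes on version B (the rewrite author's own statement) =====
-- stated objective: alternative
-- what changed: Instead of collecting all (type, quality) pairs and stable reverse-sorting the list afterwards, B maintains two parallel lists kept in ascending quality order, inserting each entry online at its position while parsing (no final sort), and reverses once at the end.
import Mathlib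
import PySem

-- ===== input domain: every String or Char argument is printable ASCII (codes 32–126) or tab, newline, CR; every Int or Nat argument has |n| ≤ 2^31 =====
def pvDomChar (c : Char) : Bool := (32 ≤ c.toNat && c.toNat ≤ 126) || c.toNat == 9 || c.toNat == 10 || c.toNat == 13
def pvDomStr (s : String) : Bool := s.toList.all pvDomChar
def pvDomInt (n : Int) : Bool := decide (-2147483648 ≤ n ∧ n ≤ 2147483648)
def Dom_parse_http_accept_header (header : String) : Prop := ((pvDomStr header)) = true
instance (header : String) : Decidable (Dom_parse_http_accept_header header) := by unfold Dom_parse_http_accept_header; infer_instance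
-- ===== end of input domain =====

-- B replaces A's collect-then-stable-reverse-sort with an online insertion pass:
-- two parallel lists kept in ascending quality order, one insertion per parsed item,
-- one final reversal and no sort phase.

-- ===== PORT A =====
-- 'subcomponents[0]'/'subcomponents[1]': ';' ∈ component guarantees split(';') has ≥ 2 parts,
-- so the IndexError branch of pyGet? is unreachable and '.getD ""' is never taken.
def parse_http_accept_header (header : String) : List String :=
  let components := ((PySem.Str.split? header ",").getD []).map (fun item => PySem.Str.strip item)
  let l := components.foldl (fun l component =>
    if PySem.Str.isIn ";" component then
      let subcomponents := ((PySem.Str.split? component ";").getD []).map (fun item => PySem.Str.strip item)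
      l ++ [(((PySem.List.pyGet? subcomponents 0).getD ""),
             PySem.Str.slice ((PySem.List.pyGet? subcomponents 1).getD "") (some 2) none)]
    else
      l ++ [(component, "1")]) []
  let sorted := PySem.List.sorted l (fun i => i.2) true
  sorted.foldl (fun content_types i => content_types ++ [i.1]) []

-- ===== PORT B =====
-- helper '_parse_component' of Source B
def pvParseComponent (item : String) : String × String :=
  let component := PySem.Str.strip item
  if PySem.Str.isIn ";" component then
    let subcomponents := ((PySem.Str.split? component ";").getD []).map (fun s => PySem.Str.strip s)
    (((PySem.List.pyGet? subcomponents 0).getD ""),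
     PySem.Str.slice ((PySem.List.pyGet? subcomponents 1).getD "") (some 2) none)
  else
    (component, "1")

-- Source B's 'while i < len(quals) and quals[i] < quality: i += 1' (the insertion position)
def pvInsPos (quals : List String) (quality : String) : Nat :=
  match quals with
  | [] => 0
  | x :: xs => if x < quality then pvInsPos xs quality + 1 else 0

def parse_http_accept_header_alt (header : String) : List String :=
  let st := ((PySem.Str.split? header ",").getD []).foldl
    (fun (st : List String × List String) item =>
      let p := pvParseComponent item
      let i := pvInsPos st.2 p.2
      (PySem.List.insert st.1 (i : Int) p.1, PySem.List.insert st.2 (i : Int) p.2))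
    ([], [])
  st.1.reverse

-- ===== PRECONDITION & SPEC =====
def Spec_parse_http_accept_header (header : String) (out : List String) : Prop := out = parse_http_accept_header_alt header
instance (header : String) (out : List String) : Decidable (Spec_parse_http_accept_header header out) := by unfold Spec_parse_http_accept_header; infer_instance

-- ===== CLAIM =====
def Claim_equal_parse_http_accept_header : Prop := ∀ (header : String), Dom_parse_http_accept_header header → Spec_parse_http_accept_header header (parse_http_accept_header header)

-- ===== LEMMAS AND PROOFS =====

-- insertBy splits its list at the first element the new one goes before
theorem pvInsertBy_eq_takeWhile {α : Type} (before : α → α → Bool) (x : α) (l : List α) :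
    PySem.List.insertBy before x l
      = l.takeWhile (fun a => !before x a) ++ x :: l.dropWhile (fun a => !before x a) := by
  induction l with
  | nil => simp [PySem.List.insertBy]
  | cons a l ih =>
    by_cases h : before x a = true
    · simp [PySem.List.insertBy, h]
    · simp only [Bool.not_eq_true] at h
      simp [PySem.List.insertBy, h, ih]

-- the while-loop position is the length of the '< quality' prefix
theorem pvInsPos_eq (qs : List String) (q : String) :
    pvInsPos qs q = (qs.takeWhile (fun a => decide (a < q))).length := by
  induction qs with
  | nil => rfl
  | cons a qs ih =>
    rw [List.takeWhile_cons]
    by_cases h : a < q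
    · rw [if_pos (decide_eq_true h)]
      simp [pvInsPos, h, ih]
    · rw [decide_eq_false h, if_neg Bool.false_ne_true]
      simp [pvInsPos, h]

theorem pvTakeWhile_append_all {α : Type} (p : α → Bool) (l1 l2 : List α)
    (h : ∀ a ∈ l1, p a = true) :
    (l1 ++ l2).takeWhile p = l1 ++ l2.takeWhile p := by
  induction l1 with
  | nil => simp
  | cons a l1 ih =>
    simp [h a (by simp), ih (fun a ha => h a (by simp [ha]))]

theorem pvTakeWhile_nil_of_all_false {α : Type} (p : α → Bool) (l : List α)
    (h : ∀ a ∈ l, p a = false) : l.takeWhile p = [] := by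
  cases l with
  | nil => rfl
  | cons a l => simp [h a (by simp)]

-- in a descending list, everything dropWhile(≥ q) leaves is < q
theorem pvDropWhile_lt (x2 : String) (D : List (String × String))
    (hD : D.Pairwise (fun a b => b.2 ≤ a.2)) :
    ∀ a ∈ D.dropWhile (fun a => !decide (a.2 < x2)), a.2 < x2 := by
  induction D with
  | nil => simp
  | cons b D ih =>
    intro a ha
    by_cases hb : b.2 < x2
    · rw [List.dropWhile_cons] at ha
      simp only [hb, decide_true, Bool.not_true] at ha
      rcases List.mem_cons.1 ha with rfl | h
      · exact hb
      · exact lt_of_le_of_lt ((List.pairwise_cons.1 hD).1 a h) hb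
    · rw [List.dropWhile_cons] at ha
      simp only [hb, decide_false, Bool.not_false, if_true] at ha
      exact ih (List.pairwise_cons.1 hD).2 a ha

-- one online insertion equals one step of the stable reverse insertion sort, seen reversed
theorem pvStepGen (D : List (String × String)) (x : String × String)
    (hD : D.Pairwise (fun a b => b.2 ≤ a.2)) (f : String × String → String) :
    PySem.List.insert ((D.map f).reverse) ((pvInsPos ((D.map Prod.snd).reverse) x.2 : Nat) : Int) (f x)
      = ((PySem.List.insertBy (fun a b => decide (b.2 < a.2)) x D).map f).reverse := by
  have hsplit := List.takeWhile_append_dropWhile (p := fun a : String × String => !decide (a.2 < x.2)) (l := D)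
  set T := D.takeWhile (fun a : String × String => !decide (a.2 < x.2)) with hT
  set S := D.dropWhile (fun a : String × String => !decide (a.2 < x.2)) with hS
  have hTmem : ∀ a ∈ T, ¬ a.2 < x.2 := by
    intro a ha
    have := List.mem_takeWhile_imp ha
    simpa using this
  have hSmem : ∀ a ∈ S, a.2 < x.2 := by rw [hS]; exact pvDropWhile_lt x.2 D hD
  have hDrev : ∀ (g : String × String → String), (D.map g).reverse = (S.map g).reverse ++ (T.map g).reverse := by
    intro g
    rw [← hsplit, List.map_append, List.reverse_append]
  have hpos : pvInsPos ((D.map Prod.snd).reverse) x.2 = S.length := by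
    rw [pvInsPos_eq, hDrev Prod.snd,
      pvTakeWhile_append_all _ _ _ (by
        intro a ha
        rw [List.mem_reverse] at ha
        obtain ⟨b, hb, rfl⟩ := List.mem_map.1 ha
        simpa using hSmem b hb),
      pvTakeWhile_nil_of_all_false _ _ (by
        intro a ha
        rw [List.mem_reverse] at ha
        obtain ⟨b, hb, rfl⟩ := List.mem_map.1 ha
        simpa using hTmem b hb)]
    simp
  have hlen : S.length ≤ ((D.map f).reverse).length := by
    rw [List.length_reverse, List.length_map, ← hsplit, List.length_append]
    omega
  rw [hpos, PySem.List.insert_natCast _ _ _ hlen, hDrev f]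
  have hlenS : ((S.map f).reverse).length = S.length := by
    rw [List.length_reverse, List.length_map]
  rw [List.take_left' hlenS, List.drop_left' hlenS]
  have hIB : PySem.List.insertBy (fun a b => decide (b.2 < a.2)) x D = T ++ x :: S := by
    rw [pvInsertBy_eq_takeWhile]
  rw [hIB, List.map_append, List.map_cons, List.reverse_append, List.reverse_cons, List.append_assoc]
  simp

-- B's whole fold equals A's sorted list, component-wise and reversed
theorem pvFoldInv (items : List String) :
    items.foldl (fun (st : List String × List String) item =>
        let p := pvParseComponent item
        let i := pvInsPos st.2 p.2
        (PySem.List.insert st.1 (i : Int) p.1, PySem.List.insert st.2 (i : Int) p.2)) ([], [])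
      = (((PySem.List.sorted (items.map pvParseComponent) (fun p => p.2) true).map Prod.fst).reverse,
         ((PySem.List.sorted (items.map pvParseComponent) (fun p => p.2) true).map Prod.snd).reverse) := by
  induction items using List.reverseRecOn with
  | nil => rfl
  | append_singleton items it ih =>
    rw [List.foldl_append, List.foldl_cons, List.foldl_nil, ih]
    have hsort : PySem.List.sorted ((items ++ [it]).map pvParseComponent) (fun p => p.2) true
        = PySem.List.insertBy (fun a b => decide (b.2 < a.2)) (pvParseComponent it)
            (PySem.List.sorted (items.map pvParseComponent) (fun p => p.2) true) := by
      rw [PySem.List.sorted_rev_eq_foldl_insertBy, PySem.List.sorted_rev_eq_foldl_insertBy,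
        List.map_append, List.map_singleton, List.foldl_append, List.foldl_cons, List.foldl_nil]
    rw [hsort]
    dsimp only
    rw [pvStepGen _ _ (PySem.List.sorted_pairwise_rev _ _) Prod.fst,
      pvStepGen _ _ (PySem.List.sorted_pairwise_rev _ _) Prod.snd]

-- A builds the (type, quality) list and stable-reverse-sorts it
theorem pvA_eq (header : String) :
    parse_http_accept_header header
      = (PySem.List.sorted (((PySem.Str.split? header ",").getD []).map pvParseComponent)
          (fun p => p.2) true).map (fun p => p.1) := by
  unfold parse_http_accept_header
  dsimp only
  rw [List.foldl_map]
  have h1 : (fun (l : List (String × String)) (item : String) =>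
      if PySem.Str.isIn ";" (PySem.Str.strip item) then
        l ++ [(((PySem.List.pyGet? (((PySem.Str.split? (PySem.Str.strip item) ";").getD []).map (fun item => PySem.Str.strip item)) 0).getD ""),
               PySem.Str.slice ((PySem.List.pyGet? (((PySem.Str.split? (PySem.Str.strip item) ";").getD []).map (fun item => PySem.Str.strip item)) 1).getD "") (some 2) none)]
      else l ++ [(PySem.Str.strip item, "1")])
      = fun l item => l ++ [pvParseComponent item] := by
    funext l item
    unfold pvParseComponent
    dsimp only
    by_cases h : PySem.Str.isIn ";" (PySem.Str.strip item) = true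
    · rw [if_pos h, if_pos h]
    · rw [if_neg h, if_neg h]
  rw [h1, PySem.List.foldl_append_singleton_eq_map,
    PySem.List.foldl_append_singleton_eq_map]
  rfl

-- ===== VERDICT (by name: the statement is the Claim_ definition above) =====
theorem parse_http_accept_header_spec : Claim_equal_parse_http_accept_header := by
  intro header _
  unfold Spec_parse_http_accept_header parse_http_accept_header_alt
  dsimp only
  rw [pvFoldInv]
  dsimp only
  rw [List.reverse_reverse, pvA_eq]
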